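-- pv_equiv track=rewrite | github.com/kangmengmeng/python- | 刷题记录/排序去掉重复.py | tick
-- ===== SOURCE A (Python) =====
-- def tick(nums):
--     l = len(nums)
--     if l < 2:
--         return l
--     nums.sort()
--     start = 0
--     for x in range(1,l):
--         if nums[start] != nums[x]:
--             nums[start+1] = nums[x]
--             start += 1
--     return start+1
-- ===== SOURCE B (Python) =====
-- def tick(nums):
--     nums.sort()
--     uniq = list(dict.fromkeys(nums))
--     nums[:len(uniq)] = uniq
--     return len(uniq)
-- ===== Notes on version B (the rewrite author's own statement) =====
-- stated objective: simpler
-- what changed: A compacts in place with a two-pointer loop over indices that maintains a write position; B sorts, builds the distinct-value list in one pass with dict.fromkeys, writes it back with one slice assignment, and returns its length (same return value and same mutation of nums).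
import Mathlib
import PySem

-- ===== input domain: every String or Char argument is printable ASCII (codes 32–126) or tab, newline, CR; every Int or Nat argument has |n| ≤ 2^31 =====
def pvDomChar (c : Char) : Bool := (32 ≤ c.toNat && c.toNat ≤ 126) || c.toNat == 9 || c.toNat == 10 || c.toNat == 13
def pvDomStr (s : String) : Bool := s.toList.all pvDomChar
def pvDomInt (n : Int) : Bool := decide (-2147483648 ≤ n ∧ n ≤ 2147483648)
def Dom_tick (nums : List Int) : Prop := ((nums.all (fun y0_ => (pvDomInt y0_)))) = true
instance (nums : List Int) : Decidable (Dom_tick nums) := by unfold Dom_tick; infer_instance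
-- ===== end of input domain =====

-- B replaces A's in-place two-pointer compaction loop by sort + ordered dedup (dict.fromkeys) +
-- slice assignment (objective: simpler). The equivalence proved here is about the RETURN value;
-- both Pythons also mutate nums in place, and they mutate it identically.

-- ===== PORT A =====
-- the body of A's 'for x in range(1, l)' loop, acting on the state (nums, start)
def tickStep (st : List Int × Int) (x : Int) : List Int × Int :=
  if PySem.List.pyGetD st.1 st.2 0 ≠ PySem.List.pyGetD st.1 x 0 then
    (PySem.List.pySetD st.1 (st.2 + 1) (PySem.List.pyGetD st.1 x 0), st.2 + 1)
  else st

def tick (nums : List Int) : Int :=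
  let l : Int := nums.length
  if l < 2 then l
  else
    let s := PySem.List.sorted nums (fun v => v)
    ((PySem.List.pyRange 1 l).foldl tickStep (s, 0)).2 + 1

-- ===== PORT B =====
def tick_alt (nums : List Int) : Int :=
  ((PySem.List.dedup (PySem.List.sorted nums (fun v => v))).length : Int)

-- ===== PRECONDITION & SPEC =====
def Spec_tick (nums : List Int) (out : Int) : Prop := out = tick_alt nums
instance (nums : List Int) (out : Int) : Decidable (Spec_tick nums out) := by unfold Spec_tick; infer_instance

-- ===== CLAIM (what is proved, stated in full; the proofs are below) =====
def Claim_equal_tick : Prop := ∀ (nums : List Int), Dom_tick nums → Spec_tick nums (tick nums)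

-- ===== LEMMAS AND PROOFS =====

-- number of positions in prev :: t where the value differs from its predecessor
def chainCount (prev : Int) : List Int → Nat
  | [] => 0
  | y :: t => (if y ≠ prev then 1 else 0) + chainCount y t

-- invariant of A's loop: arr agrees with s from index n on, arr[start] is the last value written,
-- and the loop adds one to start per change of value along the rest of s
lemma tick_loop_inv (s : List Int) (k : Nat) : ∀ (n : Nat) (arr : List Int) (start prev : Int),
    s.length - n = k → n ≤ s.length → arr.length = s.length → 0 ≤ start → start < (n : Int) →
    PySem.List.pyGetD arr start 0 = prev →
    (∀ i : Nat, n ≤ i → i < s.length → PySem.List.pyGetD arr (i : Int) 0 = PySem.List.pyGetD s (i : Int) 0) →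
    ((PySem.List.pyRange (n : Int) (s.length : Int)).foldl tickStep (arr, start)).2
      = start + (chainCount prev (s.drop n) : Int) := by
  induction k with
  | zero =>
    intro n arr start prev hk hn _ _ _ _ _
    have hn' : n = s.length := by omega
    subst hn'
    rw [PySem.List.pyRange_one_eq_nil (by omega)]
    simp [List.drop_length, chainCount]
  | succ k ih =>
    intro n arr start prev hk hn harr hs0 hsn hgp hsuf
    have hlt : n < s.length := by omega
    have hsb : (0 : Int) ≤ start + 1 := by omega
    have hsb2 : (start + 1).toNat < arr.length := by omega
    have hx : PySem.List.pyGetD arr (n : Int) 0 = PySem.List.pyGetD s (n : Int) 0 :=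
      hsuf n le_rfl hlt
    have hsv : PySem.List.pyGetD s (n : Int) 0 = s[n] := by
      rw [PySem.List.pyGetD_natCast]; exact List.getD_eq_getElem s 0 hlt
    have hdrop : s.drop n = s[n] :: s.drop (n + 1) := List.drop_eq_getElem_cons hlt
    rw [PySem.List.pyRange_one_cons (by exact_mod_cast hlt)]
    simp only [List.foldl_cons]
    have hcast : (n : Int) + 1 = ((n + 1 : Nat) : Int) := by push_cast; ring
    by_cases hc : PySem.List.pyGetD arr start 0 = PySem.List.pyGetD arr (n : Int) 0
    · -- values equal: state unchanged, the last written value is now s[n]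
      have hstep : tickStep (arr, start) (n : Int) = (arr, start) := by
        unfold tickStep
        exact if_neg (not_not_intro hc)
      have hprev : prev = s[n] := by rw [← hgp, hc, hx, hsv]
      rw [hstep, hcast,
        ih (n + 1) arr start (s[n]) (by omega) (by omega) harr hs0 (by push_cast; omega)
          (by rw [hgp]; exact hprev) (fun i h1 h2 => hsuf i (by omega) h2)]
      rw [hdrop]
      simp [chainCount, hprev]
    · -- values differ: write s[n] at start+1, bump start
      have hne : s[n] ≠ prev := by rw [← hgp, ← hsv, ← hx]; exact fun h => hc h.symm
      have hstep : tickStep (arr, start) (n : Int) =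
          (PySem.List.pySetD arr (start + 1) (PySem.List.pyGetD arr (n : Int) 0), start + 1) := by
        unfold tickStep
        exact if_pos hc
      have harr' : PySem.List.pySetD arr (start + 1) (PySem.List.pyGetD arr (n : Int) 0)
          = arr.set (start + 1).toNat (s[n]) := by
        rw [hx, hsv, PySem.List.pySetD_of_nonneg arr _ hsb]
      have hgp' : PySem.List.pyGetD (arr.set (start + 1).toNat (s[n])) (start + 1) 0 = s[n] := by
        rw [PySem.List.pyGetD_eq_getElem _ 0 hsb (by simp; omega)]
        simp
      have hsuf' : ∀ i : Nat, n + 1 ≤ i → i < s.length →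
          PySem.List.pyGetD (arr.set (start + 1).toNat (s[n])) (i : Int) 0
            = PySem.List.pyGetD s (i : Int) 0 := by
        intro i h1 h2
        rw [← hsuf i (by omega) h2, PySem.List.pyGetD_natCast, PySem.List.pyGetD_natCast]
        have hne2 : (start + 1).toNat ≠ i := by omega
        simp [List.getD_eq_getElem?_getD, hne2]
      rw [hstep, harr', hcast,
        ih (n + 1) (arr.set (start + 1).toNat (s[n])) (start + 1) (s[n]) (by omega) (by omega)
          (by simpa using harr) (by omega) (by push_cast; omega) hgp' hsuf']
      rw [hdrop]
      simp only [chainCount, if_pos hne]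
      push_cast
      ring

-- folding Set.add over a nondecreasing list adds exactly one element per change of value
lemma setfold_len : ∀ (t acc : List Int) (prev : Int),
    prev ∈ acc → (∀ z ∈ acc, z ≤ prev) → (∀ y ∈ t, prev ≤ y) → t.Pairwise (· ≤ ·) →
    (t.foldl PySem.Set.add acc).length = acc.length + chainCount prev t := by
  intro t
  induction t with
  | nil => intro acc prev _ _ _ _; simp [chainCount]
  | cons y t ih =>
    intro acc prev hmem hub hlb hpw
    obtain ⟨hhd, htl⟩ := List.pairwise_cons.mp hpw
    simp only [List.foldl_cons]
    by_cases hy : y = prev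
    · subst hy
      have hadd : PySem.Set.add acc y = acc := by simp [PySem.Set.add, hmem]
      rw [hadd, ih acc y hmem hub hhd htl]
      simp [chainCount]
    · have hlt : prev < y := lt_of_le_of_ne (hlb y (by simp)) fun h => hy h.symm
      have hnotin : y ∉ acc := fun h => absurd (hub y h) (not_le.mpr hlt)
      have hadd : PySem.Set.add acc y = acc ++ [y] := by
        simp [PySem.Set.add, hnotin]
      rw [hadd, ih (acc ++ [y]) y (by simp)
        (fun z hz => by
          rcases List.mem_append.mp hz with h | h
          · exact le_of_lt (lt_of_le_of_lt (hub z h) hlt)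
          · simp at h; omega)
        hhd htl]
      simp [chainCount, hy]
      omega

lemma tick_eq (nums : List Int) : tick nums = tick_alt nums := by
  unfold tick tick_alt
  by_cases hl : (nums.length : Int) < 2
  · simp only [if_pos hl]
    match nums with
    | [] =>
      rw [PySem.List.sorted_eq_self_of_pairwise ([] : List Int) _ (by simp)]
      simp [PySem.List.dedup_eq_ofList, PySem.Set.ofList_eq_foldl]
    | [a] =>
      rw [PySem.List.sorted_eq_self_of_pairwise [a] _ (by simp)]
      simp [PySem.List.dedup_eq_ofList, PySem.Set.ofList_eq_foldl, PySem.Set.add]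
    | a :: b :: t => simp at hl; omega
  · simp only [if_neg hl]
    have hlen : (PySem.List.sorted nums (fun v : Int => v)).length = nums.length :=
      PySem.List.length_sorted nums _ false
    set s := PySem.List.sorted nums (fun v : Int => v) with hsdef
    have h2 : 2 ≤ s.length := by omega
    obtain ⟨a, t, hst⟩ := List.exists_cons_of_ne_nil
      (by intro h; rw [h] at h2; simp at h2 : s ≠ [])
    have hpw : s.Pairwise (· ≤ ·) := by
      have := PySem.List.sorted_pairwise nums (fun v : Int => v)
      simpa using this
    have hA := tick_loop_inv s (s.length - 1) 1 s 0 a rfl (by omega) rfl le_rfl (by norm_num)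
      (by rw [hst]; exact PySem.List.pyGetD_zero_cons a t 0)
      (fun i _ _ => rfl)
    rw [show ((1 : Nat) : Int) = 1 by norm_num] at hA
    have hB : (PySem.List.dedup s).length = 1 + chainCount a t := by
      rw [PySem.List.dedup_eq_ofList, PySem.Set.ofList_eq_foldl, hst]
      simp only [List.foldl_cons]
      have h0 : PySem.Set.add ([] : List Int) a = [a] := by simp [PySem.Set.add]
      rw [h0, setfold_len t [a] a (by simp) (by simp)
        (fun y hy => (List.pairwise_cons.mp (hst ▸ hpw)).1 y hy)
        (List.pairwise_cons.mp (hst ▸ hpw)).2]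
      simp
    have hln : (nums.length : Int) = (s.length : Int) := by rw [hlen]
    rw [hln, hA, hB, hst]
    simp
    omega

-- ===== VERDICT (by name: the statement is the Claim_ definition above) =====
theorem tick_spec : Claim_equal_tick := by
  intro nums _
  unfold Spec_tick
  exact tick_eq nums
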